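-- pv_equiv track=rewrite | github.com/JonneryR/DC_TianCheng | util.py | get_5min_count
-- ===== SOURCE A (Python) =====
-- def get_5min_count(data):
--     time_list = []
--     if(len(data)>=1):
--         for item in data:
--             if(item + 300*1000 > max(data)):
--                 time_list.append(item)
--         return len(time_list)
--     else:
--         return 0
-- ===== SOURCE B (Python) =====
-- def _bisect_right(s, x):
--     lo, hi = 0, len(s)
--     while lo < hi:
--         mid = (lo + hi) // 2
--         if s[mid] <= x:
--             lo = mid + 1
--         else:
--             hi = mid
--     return lo
--
--
-- def get_5min_count(data):
--     if not data:
--         return 0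
--     s = sorted(data)
--     threshold = s[-1] - 300 * 1000
--     return len(s) - _bisect_right(s, threshold)
-- ===== Notes on version B (the rewrite author's own statement) =====
-- stated objective: faster
-- what changed: Replaces the linear predicate scan that recomputes max(data) on every iteration with sort-then-binary-search: threshold = max - 300000, answer = len(s) - bisect_right(s, threshold) on the sorted list.
import Mathlib
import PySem

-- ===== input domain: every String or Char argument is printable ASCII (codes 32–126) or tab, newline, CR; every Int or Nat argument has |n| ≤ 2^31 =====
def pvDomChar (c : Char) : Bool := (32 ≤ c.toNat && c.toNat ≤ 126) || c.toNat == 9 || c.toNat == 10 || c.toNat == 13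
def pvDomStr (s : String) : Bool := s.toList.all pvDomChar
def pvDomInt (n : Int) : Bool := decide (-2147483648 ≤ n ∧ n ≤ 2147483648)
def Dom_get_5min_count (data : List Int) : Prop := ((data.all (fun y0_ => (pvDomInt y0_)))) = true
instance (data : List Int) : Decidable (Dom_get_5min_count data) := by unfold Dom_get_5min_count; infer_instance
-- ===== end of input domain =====

-- ===== PORT A =====
-- B replaces A's linear scan (which recomputes max(data) each iteration) with sort + binary search.
def get_5min_count (data : List Int) : Int :=
  let time_list : List Int := []
  if data.length ≥ 1 then
    let time_list := data.foldl
      (fun acc item =>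
        if item + 300 * 1000 > (PySem.List.max? data (fun y => y)).getD 0 then acc ++ [item]
        else acc) time_list
    (time_list.length : Int)
  else 0

-- ===== PORT B =====
-- hand-written bisect_right from Source B: binary search for the insertion point after all elements ≤ x
def bisectR (s : List Int) (x : Int) (lo hi : Nat) : Nat :=
  if _h : lo < hi then
    let mid := (lo + hi) / 2
    if s.getD mid 0 ≤ x then bisectR s x (mid + 1) hi
    else bisectR s x lo mid
  else lo
termination_by hi - lo
decreasing_by all_goals omega

def get_5min_count_alt (data : List Int) : Int :=
  if data = [] then 0
  else
    let s := PySem.List.sorted data (fun y => y) false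
    let threshold := PySem.List.pyGetD s (-1) 0 - 300 * 1000
    (s.length : Int) - (bisectR s threshold 0 s.length : Int)

-- ===== PRECONDITION & SPEC =====
def Spec_get_5min_count (data : List Int) (out : Int) : Prop := out = get_5min_count_alt data
instance (data : List Int) (out : Int) : Decidable (Spec_get_5min_count data out) := by unfold Spec_get_5min_count; infer_instance

-- ===== CLAIM (what is proved, stated in full; the proofs are below) =====
def Claim_equal_get_5min_count : Prop := ∀ (data : List Int), Dom_get_5min_count data → Spec_get_5min_count data (get_5min_count data)

-- ===== LEMMAS AND PROOFS =====

-- on a ≤-sorted list, the elements ≤ x are exactly the first countP(· ≤ x) entries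
theorem sorted_countP_index (x : Int) (s : List Int)
    (hs : s.Pairwise (fun a b => a ≤ b)) :
    ∀ i (hi : i < s.length), (s[i] ≤ x ↔ i < s.countP (fun a => decide (a ≤ x))) := by
  induction s with
  | nil => intro i hi; simp at hi
  | cons a t ih =>
    rcases List.pairwise_cons.mp hs with ⟨ha, ht⟩
    intro i hi
    by_cases hax : a ≤ x
    · have hc : (a :: t).countP (fun a => decide (a ≤ x))
          = t.countP (fun a => decide (a ≤ x)) + 1 := by
        simp [hax]
      cases i with
      | zero => simpa [hc] using hax
      | succ j =>
        have hj : j < t.length := by simpa using hi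
        have := ih ht j hj
        simpa [hc, Nat.succ_lt_succ_iff] using this
    · have hct : t.countP (fun a => decide (a ≤ x)) = 0 := by
        rw [List.countP_eq_zero]
        intro b hb
        simp only [decide_eq_true_eq]
        have := ha b hb
        omega
      have hc : (a :: t).countP (fun a => decide (a ≤ x)) = 0 := by
        simp [hax, hct]
      rw [hc]
      cases i with
      | zero => simpa using hax
      | succ j =>
        have hj : j < t.length := by simpa using hi
        simp only [List.getElem_cons_succ]
        constructor
        · intro hle
          exfalso
          have h1 := ha t[j] (List.getElem_mem hj)
          omega
        · omega

-- the binary search returns countP(· ≤ x) whenever the fence [lo, hi] brackets it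
theorem bisectR_eq (s : List Int) (x : Int)
    (hs : s.Pairwise (fun a b => a ≤ b)) :
    ∀ lo hi, hi ≤ s.length → lo ≤ s.countP (fun a => decide (a ≤ x)) →
      s.countP (fun a => decide (a ≤ x)) ≤ hi → bisectR s x lo hi = s.countP (fun a => decide (a ≤ x)) := by
  intro lo hi
  induction hn : hi - lo using Nat.strong_induction_on generalizing lo hi with
  | _ n ih =>
    intro hhi hlo hc
    rw [bisectR]
    by_cases h : lo < hi
    · simp only [h, dif_pos]
      set c := s.countP (fun a => decide (a ≤ x)) with hcdef
      have hmid1 : (lo + hi) / 2 < hi := by omega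
      have hmid2 : lo ≤ (lo + hi) / 2 := by omega
      have hmlen : (lo + hi) / 2 < s.length := by omega
      have hidx := sorted_countP_index x s hs ((lo + hi) / 2) hmlen
      have hget : s.getD ((lo + hi) / 2) 0 = s[(lo + hi) / 2] := List.getD_eq_getElem s 0 hmlen
      by_cases hle : s.getD ((lo + hi) / 2) 0 ≤ x
      · simp only [hle, if_pos]
        have hlt : (lo + hi) / 2 < c := hidx.mp (hget ▸ hle)
        exact ih (hi - ((lo + hi) / 2 + 1)) (by omega) _ _ rfl hhi (by omega) hc
      · simp only [hle, if_neg, not_false_iff]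
        have hge : c ≤ (lo + hi) / 2 := by
          by_contra hcon
          exact hle (hget ▸ hidx.mpr (by omega))
        exact ih ((lo + hi) / 2 - lo) (by omega) _ _ rfl (by omega) hlo hge
    · simp only [h, dif_neg, not_false_iff]
      omega

-- the last element of the sorted list is the Python max of the data
theorem sorted_last_eq_max (data : List Int) (hne : data ≠ []) :
    PySem.List.pyGetD (PySem.List.sorted data (fun y => y) false) (-1) 0
      = (PySem.List.max? data (fun y => y)).getD 0 := by
  set s := PySem.List.sorted data (fun y => y) false with hsdef
  have hperm : s.Perm data := PySem.List.sorted_perm data (fun y => y) false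
  have hsne : s ≠ [] := by
    intro hnil
    exact hne ((hnil ▸ hperm).symm.eq_nil)
  rw [PySem.List.pyGetD_neg_one s 0 hsne]
  obtain ⟨m, hm⟩ : ∃ m, PySem.List.max? data (fun y => y) = some m := by
    cases hq : PySem.List.max? data (fun y => y) with
    | none => exact absurd ((PySem.List.max?_eq_none_iff data (fun y => y)).mp hq) hne
    | some m => exact ⟨m, rfl⟩
  rw [hm]
  simp only [Option.getD_some]
  have hmax := PySem.List.max?_isMax hm
  have hmmem : m ∈ data := PySem.List.max?_mem hm
  have hpair : s.Pairwise (fun a b => a ≤ b) := PySem.List.sorted_pairwise data (fun y => y)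
  have hlast_mem : s.getLast hsne ∈ s := List.getLast_mem hsne
  have h1 : s.getLast hsne ≤ m := hmax _ (hperm.mem_iff.mp hlast_mem)
  have h2 : m ≤ s.getLast hsne := by
    have hmem_s : m ∈ s := hperm.mem_iff.mpr hmmem
    obtain ⟨i, hil, hix⟩ := List.getElem_of_mem hmem_s
    have hlast : s.getLast hsne = s[s.length - 1] := List.getLast_eq_getElem hsne
    rw [hlast, ← hix]
    by_cases hie : i = s.length - 1
    · simp [hie]
    · exact List.pairwise_iff_getElem.mp hpair i (s.length - 1) hil (by omega) (by omega)
  omega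

-- ===== VERDICT (by name: the statement is the Claim_ definition above) =====
theorem get_5min_count_spec : Claim_equal_get_5min_count := by
  intro data _hdom
  unfold Spec_get_5min_count get_5min_count get_5min_count_alt
  by_cases hne : data = []
  · subst hne; simp
  · have hlen : data.length ≥ 1 := by
      cases data with
      | nil => exact absurd rfl hne
      | cons a t => simp
    simp only [hlen, if_pos, hne, if_neg, not_false_iff]
    set M := (PySem.List.max? data (fun y => y)).getD 0 with hMdef
    set s := PySem.List.sorted data (fun y => y) false with hsdef
    set t := PySem.List.pyGetD s (-1) 0 - 300 * 1000 with htdef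
    have hperm : s.Perm data := PySem.List.sorted_perm data (fun y => y) false
    have hpair : s.Pairwise (fun a b => a ≤ b) := PySem.List.sorted_pairwise data (fun y => y)
    have hMt : t = M - 300 * 1000 := by rw [htdef, sorted_last_eq_max data hne]
    -- A's loop builds the filter of the predicate
    have hA : data.foldl
        (fun acc item => if item + 300 * 1000 > M then acc ++ [item] else acc) ([] : List Int)
        = data.filter (fun item => decide (item + 300 * 1000 > M)) := by
      simpa using PySem.List.foldl_append_if (fun item => decide (item + 300 * 1000 > M)) (fun x => x) data []
    rw [hA]
    -- B's binary search computes countP(· ≤ t) on s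
    set c := s.countP (fun a => decide (a ≤ t)) with hcdef
    have hcle : c ≤ s.length := List.countP_le_length
    have hB : bisectR s t 0 s.length = c :=
      bisectR_eq s t hpair 0 s.length le_rfl (Nat.zero_le _) hcle
    rw [hB]
    -- relate the two counts
    have hcount : (data.filter (fun item => decide (item + 300 * 1000 > M))).length
        = s.length - c := by
      rw [← List.countP_eq_length_filter]
      have h1 : data.countP (fun item => decide (item + 300 * 1000 > M))
          = s.countP (fun item => decide (item + 300 * 1000 > M)) :=
        (hperm.countP_eq _).symm
      have h2 : ∀ a : Int, (decide (a + 300 * 1000 > M)) = ! decide (a ≤ t) := by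
        intro a
        rw [hMt]
        simp only [← decide_not, decide_eq_decide]
        omega
      have h3 : s.countP (fun item => decide (item + 300 * 1000 > M))
          = s.countP (fun a => ! decide (a ≤ t)) := by
        apply List.countP_congr
        intro a _
        rw [h2 a]
      have h4 := List.length_eq_countP_add_countP (fun a => decide (a ≤ t)) (l := s)
      simp only [decide_not, Bool.decide_eq_true] at h4
      rw [← hcdef] at h4
      rw [h1, h3]
      omega
    rw [hcount]
    omega
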